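-- pv_equiv track=rewrite | github.com/richardslab/EXWAS_pipeline | python_scripts/python_helpers/vep_helpers/parse_vep.py | __parse_polyphen2_hvar
-- ===== SOURCE A (Python) =====
-- def __parse_polyphen2_hvar(consequence,consequence_elem,POLYPHEN2_HVAR_ORDER):
--   p2hvar_order = [x.upper().strip() for x in consequence_elem[1].split(",")]
--   p2hvar_order = [x for x in p2hvar_order if x!='.']
--   if len(p2hvar_order) == 0:
--     return None
--   assert(
--     all(
--       [x in POLYPHEN2_HVAR_ORDER for x in p2hvar_order]
--     )
--   ),f"invalid Polyphen2 HVAR results {consequence}"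
--
--   # the first occurence is the most severe
--   for i in POLYPHEN2_HVAR_ORDER:
--     if i in p2hvar_order:
--       return i
--   assert False
-- ===== SOURCE B (Python) =====
-- def __parse_polyphen2_hvar(consequence, consequence_elem, POLYPHEN2_HVAR_ORDER):
--   # single pass over the comma-separated field, tracking the smallest rank seen
--   best = None
--   for piece in consequence_elem[1].split(","):
--     tok = piece.upper().strip()
--     if tok == '.':
--       continue
--     r = POLYPHEN2_HVAR_ORDER.index(tok)  # ValueError on an invalid token (A's assert fires there)
--     if best is None or r < best:
--       best = r
--   if best is None:
--     return None
--   return POLYPHEN2_HVAR_ORDER[best]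
-- ===== Notes on version B (the rewrite author's own statement) =====
-- stated objective: alternative
-- what changed: A builds the full token list in two comprehensions and then scans the reference order returning the first category present; B makes one pass over the raw comma-split pieces with an Option accumulator holding the smallest rank seen so far, and indexes the reference order once at the end, never materialising a token list.
import Mathlib
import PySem

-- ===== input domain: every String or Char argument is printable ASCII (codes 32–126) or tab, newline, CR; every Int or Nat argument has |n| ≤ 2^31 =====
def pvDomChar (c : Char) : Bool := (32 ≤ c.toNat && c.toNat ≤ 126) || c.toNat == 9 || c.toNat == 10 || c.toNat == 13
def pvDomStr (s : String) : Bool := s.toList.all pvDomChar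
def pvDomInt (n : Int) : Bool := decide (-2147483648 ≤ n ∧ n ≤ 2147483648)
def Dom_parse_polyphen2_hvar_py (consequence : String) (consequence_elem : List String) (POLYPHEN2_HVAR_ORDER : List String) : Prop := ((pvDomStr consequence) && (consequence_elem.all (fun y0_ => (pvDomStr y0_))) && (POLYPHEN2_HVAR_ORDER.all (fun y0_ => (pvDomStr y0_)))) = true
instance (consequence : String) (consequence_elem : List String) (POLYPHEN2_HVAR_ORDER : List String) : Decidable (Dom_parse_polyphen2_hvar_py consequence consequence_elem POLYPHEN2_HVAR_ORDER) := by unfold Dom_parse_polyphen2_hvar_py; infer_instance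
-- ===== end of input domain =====

-- B replaces A's two list comprehensions + scan over the reference order by a single pass over the
-- raw comma-split pieces with a smallest-rank-so-far accumulator (objective: alternative).

-- ===== PORT A =====
def parse_polyphen2_hvar_py (consequence : String) (consequence_elem : List String) (POLYPHEN2_HVAR_ORDER : List String) : Option String :=
  match PySem.List.pyGet? consequence_elem 1 with
  | none => none      -- IndexError in Python; excluded by Pre_
  | some e =>
    let p2hvar_order := ((PySem.Str.split? e ",").getD []).map (fun x => PySem.Str.strip (PySem.Str.upper x))
    let p2hvar_order := p2hvar_order.filter (fun x => x ≠ ".")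
    if p2hvar_order.length = 0 then none
    else if p2hvar_order.all (fun x => POLYPHEN2_HVAR_ORDER.contains x) then
      -- for i in POLYPHEN2_HVAR_ORDER: if i in p2hvar_order: return i  (final assert False unreachable → none)
      POLYPHEN2_HVAR_ORDER.find? (fun i => p2hvar_order.contains i)
    else none         -- AssertionError in Python; excluded by Pre_

-- ===== PORT B =====
-- the body of B's single loop over the comma-split pieces (smallest-rank-so-far accumulator)
def pvBody (POLYPHEN2_HVAR_ORDER : List String) (best : Option Nat) (piece : String) : Option Nat :=
  let tok := PySem.Str.strip (PySem.Str.upper piece)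
  if tok = "." then best
  else
    match PySem.List.index? POLYPHEN2_HVAR_ORDER tok with
    | none => best      -- ValueError in Python; excluded by Pre_
    | some r =>
      match best with
      | none => some r
      | some b => if r < b then some r else some b

def parse_polyphen2_hvar_py_alt (consequence : String) (consequence_elem : List String) (POLYPHEN2_HVAR_ORDER : List String) : Option String :=
  match PySem.List.pyGet? consequence_elem 1 with
  | none => none      -- IndexError in Python; excluded by Pre_
  | some e =>
    match ((PySem.Str.split? e ",").getD []).foldl (pvBody POLYPHEN2_HVAR_ORDER) none with
    | none => none
    | some b => PySem.List.pyGet? POLYPHEN2_HVAR_ORDER (b : Int)   -- ord[best], always in range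

-- ===== PRECONDITION & SPEC =====
-- the token list both Pythons parse out of field 1 (used only by Pre_ and the proofs)
def pvToks (e : String) : List String :=
  ((((PySem.Str.split? e ",").getD []).map (fun x => PySem.Str.strip (PySem.Str.upper x))).filter (fun x => x ≠ "."))

-- Pre_ excludes exactly the inputs where the Python A raises: consequence_elem has no element 1
-- (IndexError), or some parsed token is not in POLYPHEN2_HVAR_ORDER (AssertionError; B raises ValueError there).
def Pre_parse_polyphen2_hvar_py (consequence : String) (consequence_elem : List String) (POLYPHEN2_HVAR_ORDER : List String) : Prop :=
  2 ≤ consequence_elem.length ∧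
  ∀ x ∈ pvToks (consequence_elem.getD 1 ""), x ∈ POLYPHEN2_HVAR_ORDER
instance (consequence : String) (consequence_elem : List String) (POLYPHEN2_HVAR_ORDER : List String) : Decidable (Pre_parse_polyphen2_hvar_py consequence consequence_elem POLYPHEN2_HVAR_ORDER) := by unfold Pre_parse_polyphen2_hvar_py; infer_instance

def pvWitness_parse_polyphen2_hvar_py : String × List String × List String :=
  ("c", ["hdr", "benign, PROBABLY_DAMAGING ,."], ["PROBABLY_DAMAGING", "POSSIBLY_DAMAGING", "BENIGN"])

def Spec_parse_polyphen2_hvar_py (consequence : String) (consequence_elem : List String) (POLYPHEN2_HVAR_ORDER : List String) (out : Option String) : Prop := out = parse_polyphen2_hvar_py_alt consequence consequence_elem POLYPHEN2_HVAR_ORDER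
instance (consequence : String) (consequence_elem : List String) (POLYPHEN2_HVAR_ORDER : List String) (out : Option String) : Decidable (Spec_parse_polyphen2_hvar_py consequence consequence_elem POLYPHEN2_HVAR_ORDER out) := by unfold Spec_parse_polyphen2_hvar_py; infer_instance

-- ===== CLAIM (what is proved, stated in full; the proofs are below) =====
def Claim_equal_parse_polyphen2_hvar_py : Prop := ∀ (consequence : String) (consequence_elem : List String) (POLYPHEN2_HVAR_ORDER : List String), Dom_parse_polyphen2_hvar_py consequence consequence_elem POLYPHEN2_HVAR_ORDER → Pre_parse_polyphen2_hvar_py consequence consequence_elem POLYPHEN2_HVAR_ORDER → Spec_parse_polyphen2_hvar_py consequence consequence_elem POLYPHEN2_HVAR_ORDER (parse_polyphen2_hvar_py consequence consequence_elem POLYPHEN2_HVAR_ORDER)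

-- ===== LEMMAS AND PROOFS =====

-- the one step of B's accumulator, once a rank has been found
def pvStep (b : Option Nat) (r : Nat) : Option Nat :=
  match b with
  | none => some r
  | some b => if r < b then some r else some b

-- B's fold over the raw pieces equals the pvStep-fold over the ranks of the parsed tokens
lemma fold_pieces (ord ps : List String) (acc : Option Nat) :
    ps.foldl (pvBody ord) acc
    = ((((ps.map (fun x => PySem.Str.strip (PySem.Str.upper x))).filter (fun x => x ≠ ".")).filterMap
        (fun t => PySem.List.index? ord t)).foldl pvStep acc) := by
  induction ps generalizing acc with
  | nil => rfl
  | cons p ps ih =>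
    simp only [List.foldl_cons, List.map_cons]
    by_cases hdot : PySem.Str.strip (PySem.Str.upper p) = "."
    · rw [show pvBody ord acc p = acc by simp only [pvBody]; rw [if_pos hdot],
          List.filter_cons_of_neg (by simp [hdot])]
      exact ih acc
    · rw [List.filter_cons_of_pos (by simp [hdot]), List.filterMap_cons]
      cases hix : PySem.List.index? ord (PySem.Str.strip (PySem.Str.upper p)) with
      | none =>
        rw [show pvBody ord acc p = acc by simp only [pvBody]; rw [if_neg hdot, hix]]
        exact ih acc
      | some r =>
        rw [show pvBody ord acc p = pvStep acc r by simp only [pvBody, pvStep]; rw [if_neg hdot, hix]]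
        show List.foldl (pvBody ord) (pvStep acc r) ps
          = List.foldl pvStep acc (r :: (((ps.map (fun x => PySem.Str.strip (PySem.Str.upper x))).filter
              (fun x => x ≠ ".")).filterMap (fun t => PySem.List.index? ord t)))
        rw [List.foldl_cons]
        exact ih (pvStep acc r)

-- the pvStep-fold from none computes List.min?
lemma fold_step_some (R : List Nat) (b : Nat) :
    R.foldl pvStep (some b) = some (R.foldl min b) := by
  induction R generalizing b with
  | nil => rfl
  | cons r R ih =>
    simp only [List.foldl_cons]
    by_cases h : r < b
    · rw [show pvStep (some b) r = some r by simp [pvStep, h],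
          show min b r = r from Nat.min_eq_right (Nat.le_of_lt h)]
      exact ih r
    · rw [show pvStep (some b) r = some b by simp [pvStep, h],
          show min b r = b from Nat.min_eq_left (Nat.le_of_not_lt h)]
      exact ih b

lemma fold_step_none (R : List Nat) : R.foldl pvStep none = R.min? := by
  cases R with
  | nil => rfl
  | cons r R =>
    rw [show (r::R).min? = some (R.foldl min r) from rfl]
    simpa [pvStep] using fold_step_some R r

-- A's first-in-order scan returns the element of ord at the minimum rank
lemma find_eq_rank (ord toks : List String)
    (m : Nat) (hm : (toks.filterMap (fun t => PySem.List.index? ord t)).min? = some m) :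
    ord.find? (fun i => toks.contains i) = PySem.List.pyGet? ord (m : Int) := by
  obtain ⟨hmem, hmin⟩ := List.min?_eq_some_iff.mp hm
  obtain ⟨t, ht, hidx⟩ := List.mem_filterMap.mp hmem
  obtain ⟨hmlt, hordm, _⟩ := PySem.List.getElem_of_index?_eq_some hidx
  rw [PySem.List.pyGet?_natCast, List.getElem?_eq_getElem hmlt]
  rw [List.find?_eq_some_iff_getElem]
  refine ⟨by simp only [List.contains_eq_mem, decide_eq_true_eq]; exact hordm ▸ ht, m, hmlt, rfl, ?_⟩
  intro j hj
  simp only [Bool.not_eq_true', List.contains_eq_mem, decide_eq_false_iff_not]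
  intro hjmem
  -- ord[j] is a token; the first index of ord[j] in ord is ≤ j < m, contradicting minimality of m
  have hmemord : ord[j] ∈ ord := List.getElem_mem _
  obtain ⟨kj, hkj⟩ := Option.isSome_iff_exists.mp ((PySem.List.index?_isSome_iff ord (ord[j])).mpr hmemord)
  obtain ⟨hkjlt, hordkj, hfirstj⟩ := PySem.List.getElem_of_index?_eq_some hkj
  have hkjle : kj ≤ j := by
    by_contra h
    exact hfirstj j (by omega) rfl
  have : m ≤ kj := hmin kj (List.mem_filterMap.mpr ⟨ord[j], hjmem, hkj⟩)
  omega

-- under Pre_ every token has an index, so the rank list is nonempty iff the token list is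
lemma ranks_ne_nil (ord toks : List String) (hsub : ∀ x ∈ toks, x ∈ ord) (hne : toks ≠ []) :
    toks.filterMap (fun t => PySem.List.index? ord t) ≠ [] := by
  cases toks with
  | nil => exact absurd rfl hne
  | cons t ts =>
    obtain ⟨k, hk⟩ := Option.isSome_iff_exists.mp
      ((PySem.List.index?_isSome_iff ord t).mpr (hsub t (List.mem_cons_self)))
    rw [PySem.List.index?_eq_idxOf?] at hk
    simp [hk]

-- ===== VERDICT (by name: the statement is the Claim_ definition above) =====
theorem parse_polyphen2_hvar_py_spec : Claim_equal_parse_polyphen2_hvar_py := by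
  intro c ce ord _hdom hpre
  obtain ⟨hlen, hsub⟩ := hpre
  unfold Spec_parse_polyphen2_hvar_py parse_polyphen2_hvar_py parse_polyphen2_hvar_py_alt
  set e := ce.getD 1 "" with he
  have hget : PySem.List.pyGet? ce (1 : Int) = some e := by
    have h1 : (1 : Nat) < ce.length := by omega
    rw [show (1 : Int) = ((1 : Nat) : Int) from rfl, PySem.List.pyGet?_natCast]
    simp [he, List.getD, List.getElem?_eq_getElem h1]
  rw [hget]
  simp only
  rw [fold_pieces, fold_step_none]
  have htoks : pvToks e
      = ((((PySem.Str.split? e ",").getD []).map (fun x => PySem.Str.strip (PySem.Str.upper x))).filter (fun x => x ≠ ".")) := rfl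
  rw [← htoks]
  by_cases hemp : pvToks e = []
  · rw [hemp]
    simp
  · have hlen0 : ¬ (pvToks e).length = 0 := by
      simpa [List.length_eq_zero_iff] using hemp
    have hall : (pvToks e).all (fun x => ord.contains x) = true := by
      simp only [List.all_eq_true, List.contains_eq_mem, decide_eq_true_eq]
      exact hsub
    simp only [hlen0, if_false, hall, if_true]
    cases hmin : ((pvToks e).filterMap (fun t => PySem.List.index? ord t)).min? with
    | none =>
      exact absurd (List.min?_eq_none_iff.mp hmin) (ranks_ne_nil ord _ hsub hemp)
    | some m =>
      exact find_eq_rank ord _ m hmin
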